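-- pv_equiv track=rewrite | github.com/CryptVest/btc-analysis-bot2 | send_to_discord.py | format_for_discord
-- ===== SOURCE A (Python) =====
-- def format_for_discord(text):
--     """Formats tables & messages for better readability in Discord."""
--     lines = text.split("\n")
--     formatted_lines = []
--     inside_table = False
--
--     for line in lines:
--         if "|" in line:  # Detects a table row
--             if not inside_table:
--                 formatted_lines.append("```")  # Open code block
--                 inside_table = True
--             formatted_lines.append(line)  # Add table row
--         else:
--             if inside_table:
--                 formatted_lines.append("```")  # Close code block
--                 inside_table = False
--             formatted_lines.append(line)  # Add normal text
--
--     if inside_table:  # Ensures table is closed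
--         formatted_lines.append("```")
--
--     return "\n".join(formatted_lines)
-- ===== SOURCE B (Python) =====
-- def format_for_discord(text):
--     """Formats tables & messages for better readability in Discord."""
--     lines = text.split("\n")
--     out = []
--     i = 0
--     n = len(lines)
--     while i < n:
--         if "|" in lines[i]:
--             j = i
--             while j < n and "|" in lines[j]:
--                 j += 1
--             out.append("```")
--             out.extend(lines[i:j])
--             out.append("```")
--             i = j
--         else:
--             out.append(lines[i])
--             i += 1
--     return "\n".join(out)
-- ===== Notes on version B (the rewrite author's own statement) =====
-- stated objective: alternative
-- what changed: B detects each maximal run of table rows (lines containing '|') with an inner scan and emits both fences per run, instead of A's per-line inside_table toggle with an end-of-loop close.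
import Mathlib
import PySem

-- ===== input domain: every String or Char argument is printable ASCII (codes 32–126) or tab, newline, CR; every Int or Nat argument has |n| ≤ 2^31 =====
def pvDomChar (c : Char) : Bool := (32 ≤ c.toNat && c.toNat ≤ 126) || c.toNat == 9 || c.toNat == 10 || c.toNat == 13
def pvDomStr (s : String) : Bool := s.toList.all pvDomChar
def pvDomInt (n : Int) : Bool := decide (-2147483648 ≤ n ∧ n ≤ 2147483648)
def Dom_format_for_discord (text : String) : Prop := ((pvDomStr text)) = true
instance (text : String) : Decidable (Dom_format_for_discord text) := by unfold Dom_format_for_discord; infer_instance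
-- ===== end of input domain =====

-- B replaces A's per-line inside_table toggle (with its end-of-loop close) by scanning each
-- maximal run of table rows and emitting both fences per run; objective: alternative.

-- ===== PORT A =====
def format_for_discord (text : String) : String :=
  let lines := (PySem.Str.split? text "\n").getD []
  let st := lines.foldl
    (fun (st : List String × Bool) line =>
      let (fl, inside) := st
      if PySem.Str.isIn "|" line then
        if !inside then (fl ++ ["```", line], true)
        else (fl ++ [line], true)
      else
        if inside then (fl ++ ["```", line], false)
        else (fl ++ [line], false))
    ([], false)
  let fl := if st.2 then st.1 ++ ["```"] else st.1
  PySem.Str.join "\n" fl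

-- ===== PORT B =====
-- the outer while loop of Source B: on a table row, the inner scan is takeWhile/dropWhile;
-- the Nat argument is a fuel/totality guard only (called with the list's length, i.e. Source B's n - i bound)
def fdRuns : Nat → List String → List String
  | 0, _ => []
  | _, [] => []
  | fuel + 1, line :: rest =>
    if PySem.Str.isIn "|" line then
      "```" :: line :: (rest.takeWhile (fun l => PySem.Str.isIn "|" l)
        ++ "```" :: fdRuns fuel (rest.dropWhile (fun l => PySem.Str.isIn "|" l)))
    else
      line :: fdRuns fuel rest

def format_for_discord_alt (text : String) : String :=
  let lines := (PySem.Str.split? text "\n").getD []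
  PySem.Str.join "\n" (fdRuns lines.length lines)

-- ===== PRECONDITION & SPEC =====
def Spec_format_for_discord (text : String) (out : String) : Prop := out = format_for_discord_alt text
instance (text : String) (out : String) : Decidable (Spec_format_for_discord text out) := by unfold Spec_format_for_discord; infer_instance

-- ===== CLAIM (what is proved, stated in full; the proofs are below) =====
def Claim_equal_format_for_discord : Prop := ∀ (text : String), Dom_format_for_discord text → Spec_format_for_discord text (format_for_discord text)

-- ===== LEMMAS AND PROOFS =====

-- A's loop, written structurally carrying the inside_table flag; the final close is folded in
def fdGoA : Bool → List String → List String
  | inside, [] => if inside then ["```"] else []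
  | inside, line :: rest =>
    if PySem.Str.isIn "|" line then
      (if !inside then ["```", line] else [line]) ++ fdGoA true rest
    else
      (if inside then ["```", line] else [line]) ++ fdGoA false rest

-- A's loop body as a named function (provably equal to the lambda in the port)
def fdStep (st : List String × Bool) (line : String) : List String × Bool :=
  if PySem.Str.isIn "|" line then
    if !st.2 then (st.1 ++ ["```", line], true) else (st.1 ++ [line], true)
  else
    if st.2 then (st.1 ++ ["```", line], false) else (st.1 ++ [line], false)

theorem fdStep_eq :
    (fun (st : List String × Bool) line =>
      let (fl, inside) := st
      if PySem.Str.isIn "|" line then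
        if !inside then (fl ++ ["```", line], true)
        else (fl ++ [line], true)
      else
        if inside then (fl ++ ["```", line], false)
        else (fl ++ [line], false)) = fdStep := by
  funext st line; cases st; rfl

theorem fdFold (ls : List String) : ∀ (fl : List String) (inside : Bool),
    (if (List.foldl fdStep (fl, inside) ls).2 then (List.foldl fdStep (fl, inside) ls).1 ++ ["```"]
     else (List.foldl fdStep (fl, inside) ls).1) = fl ++ fdGoA inside ls := by
  induction ls with
  | nil => intro fl inside; cases inside <;> simp [fdGoA]
  | cons line rest ih =>
    intro fl inside
    simp only [List.foldl_cons]
    by_cases h : PySem.Chars.isIn ['|'] line.toList = true <;> cases inside <;>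
      simp [fdStep, h, fdGoA, ih, List.append_assoc]

theorem fdGoA_true (ls : List String) :
    fdGoA true ls = ls.takeWhile (fun l => PySem.Str.isIn "|" l)
      ++ "```" :: fdGoA false (ls.dropWhile (fun l => PySem.Str.isIn "|" l)) := by
  induction ls with
  | nil => simp [fdGoA]
  | cons line rest ih =>
    by_cases h : PySem.Chars.isIn ['|'] line.toList = true
    · simp [fdGoA, h, ih]
    · simp [fdGoA, h]

theorem fdGoA_false_eq_runs (fuel : Nat) : ∀ (ls : List String), ls.length ≤ fuel →
    fdGoA false ls = fdRuns fuel ls := by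
  induction fuel with
  | zero =>
    intro ls h
    cases ls with
    | nil => simp [fdGoA, fdRuns]
    | cons line rest => simp at h
  | succ fuel ih =>
    intro ls h
    cases ls with
    | nil => simp [fdGoA, fdRuns]
    | cons line rest =>
      simp only [List.length_cons, Nat.add_le_add_iff_right] at h
      by_cases hl : PySem.Chars.isIn ['|'] line.toList = true
      · have hdrop : (List.dropWhile (fun l => PySem.Str.isIn "|" l) rest).length ≤ fuel :=
          le_trans (List.length_dropWhile_le _ rest) h
        have ihd := ih _ hdrop
        simp [fdRuns, fdGoA, hl, fdGoA_true]
        simpa using ihd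
      · simp [fdRuns, fdGoA, hl, ih rest h]

-- ===== VERDICT (by name: the statement is the Claim_ definition above) =====
theorem format_for_discord_spec : Claim_equal_format_for_discord := by
  intro text _
  unfold Spec_format_for_discord format_for_discord format_for_discord_alt
  simp only [fdStep_eq]
  rw [← fdGoA_false_eq_runs _ _ (le_refl _), fdFold]
  simp
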